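-- pv_equiv track=rewrite | github.com/arpitg1991/SOPBench | env/helpers.py | convert_ifg_connections_list_to_set
-- ===== SOURCE A (Python) =====
-- import copy
--
-- def convert_ifg_connections_list_to_set(connections:list)->list:
--     if not connections or connections and isinstance(connections[0], set): return copy.deepcopy(connections)
--     node_inds = set()
--     for node_from, node_to in connections: node_inds |= {node_from, node_to}
--     max_node_ind = max(node_inds)
--     connections_new = [set() for _ in range(max_node_ind+1)] # could be list, worse for comparision later
--     for conn_from, conn_to in connections: connections_new[conn_from].add(conn_to)
--     return connections_new
-- ===== SOURCE B (Python) =====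
-- import copy
--
-- def convert_ifg_connections_list_to_set(connections: list) -> list:
--     if not connections or isinstance(connections[0], set):
--         return copy.deepcopy(connections)
--     max_node = max(max(u, v) for u, v in connections)
--     return [{v for u, v in connections if u == i} for i in range(max_node + 1)]
-- ===== Notes on version B (the rewrite author's own statement) =====
-- stated objective: alternative
-- what changed: Instead of A's staged passes (collect the node set, take its max, preallocate a list of sets, then populate it by destructive indexed updates), B computes the max directly with one generator and then builds each output bucket independently by a per-index set comprehension that filters the edge list for that source, with no mutable pre-sized structure at all.
-- intended difference: On nonempty lists containing a negative source node u with -(max+1) <= u, A wraps the edge around to index max+1+u via Python negative indexing, while B's per-index filter never matches a negative source so those edges are left out of indices 0..max, which is the intended adjacency-list reading. — e.g. on convert_ifg_connections_list_to_set([(-1, 2)]): A returns [[], [], [2]], B returns [[], [], []]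
import Mathlib
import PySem

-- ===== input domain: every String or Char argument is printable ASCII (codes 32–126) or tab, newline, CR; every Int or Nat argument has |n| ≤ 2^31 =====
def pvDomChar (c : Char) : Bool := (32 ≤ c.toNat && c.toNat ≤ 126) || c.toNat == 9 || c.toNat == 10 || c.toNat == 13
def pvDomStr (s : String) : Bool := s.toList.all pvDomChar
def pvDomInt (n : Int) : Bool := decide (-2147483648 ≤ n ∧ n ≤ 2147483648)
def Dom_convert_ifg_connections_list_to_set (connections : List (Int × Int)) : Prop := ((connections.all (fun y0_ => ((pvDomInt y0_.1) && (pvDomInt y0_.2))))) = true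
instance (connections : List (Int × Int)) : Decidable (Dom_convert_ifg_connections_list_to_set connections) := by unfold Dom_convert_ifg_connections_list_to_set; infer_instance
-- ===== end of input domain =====

-- B drops A's staged passes and mutable pre-sized list: it takes the max of a single generator
-- and builds every bucket independently by a per-index filter of the edge list (objective:
-- alternative decomposition, O(E*V) instead of O(E+V)). Return-value equivalence only.

-- ===== PORT A =====
-- 'isinstance(connections[0], set)' is always false for connections : List (Int × Int),
-- so the deepcopy guard fires exactly on the empty list (deepcopy([]) = []).
def convert_ifg_connections_list_to_set (connections : List (Int × Int)) : List (List Int) :=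
  if connections = [] then []
  else
    let node_inds : PySem.Set Int :=
      connections.foldl (fun s p => PySem.Set.add (PySem.Set.add s p.1) p.2) PySem.Set.empty
    match PySem.List.max? node_inds (fun x => x) with
    | none => []   -- unreachable: node_inds ≠ [] when connections ≠ []
    | some max_node_ind =>
      connections.foldl
        (fun cn p =>
          PySem.List.pySetD cn p.1
            (PySem.Set.add (PySem.List.pyGetD cn p.1 PySem.Set.empty) p.2))
        (List.replicate (max_node_ind + 1).toNat [])

-- ===== PORT B =====
def convert_ifg_connections_list_to_set_alt (connections : List (Int × Int)) : List (List Int) :=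
  if connections = [] then []
  else
    match PySem.List.max? (connections.map (fun p => max p.1 p.2)) (fun x => x) with
    | none => []   -- unreachable: connections ≠ []
    | some max_node =>
      (PySem.List.pyRange 0 (max_node + 1) 1).map
        (fun i => PySem.Set.ofList ((connections.filter (fun p => p.1 == i)).map Prod.snd))

-- ===== PRECONDITION & SPEC =====
-- maximum node index occurring in the (nonempty) edge list
def pvMaxNode : List (Int × Int) → Int
  | [] => 0
  | p :: t => t.foldl (fun m q => max m (max q.1 q.2)) (max p.1 p.2)

-- Pre_ excludes exactly the inputs where A raises IndexError: a nonempty list whose nodes are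
-- all negative (the built list is empty), or a source index below -(max_node+1) (out of range).
def Pre_convert_ifg_connections_list_to_set (connections : List (Int × Int)) : Prop :=
  connections = [] ∨
    (0 ≤ pvMaxNode connections ∧
     ∀ p ∈ connections, -(pvMaxNode connections + 1) ≤ p.1)
instance (connections : List (Int × Int)) : Decidable (Pre_convert_ifg_connections_list_to_set connections) := by unfold Pre_convert_ifg_connections_list_to_set; infer_instance

def pvWitness_convert_ifg_connections_list_to_set : (List (Int × Int)) := [(0, 1), (1, 0)]

-- On a nonempty list containing a negative source node u with -(max+1) ≤ u, A returns a list in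
-- which u's neighbours were added at the wrapped-around index max+1+u (Python negative indexing);
-- B's filter never matches a negative source, the intended adjacency-list reading.
def D_convert_ifg_connections_list_to_set (connections : List (Int × Int)) : Prop :=
  ∃ p ∈ connections, p.1 < 0
instance (connections : List (Int × Int)) : Decidable (D_convert_ifg_connections_list_to_set connections) := by unfold D_convert_ifg_connections_list_to_set; infer_instance

def Spec_convert_ifg_connections_list_to_set (connections : List (Int × Int)) (out : List (List Int)) : Prop := ¬ D_convert_ifg_connections_list_to_set connections → out = convert_ifg_connections_list_to_set_alt connections
instance (connections : List (Int × Int)) (out : List (List Int)) : Decidable (Spec_convert_ifg_connections_list_to_set connections out) := by unfold Spec_convert_ifg_connections_list_to_set; infer_instance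

def pvDiffWitness_convert_ifg_connections_list_to_set : (List (Int × Int)) := [(-1, 2)]
def pvDiffWitnessOut_convert_ifg_connections_list_to_set : (List (List Int)) × (List (List Int)) :=
  ([[], [], [2]], [[], [], []])

-- ===== CLAIM (what is proved, stated in full; the proofs are below) =====
def Claim_unchanged_convert_ifg_connections_list_to_set : Prop := ∀ (connections : List (Int × Int)), Dom_convert_ifg_connections_list_to_set connections → Pre_convert_ifg_connections_list_to_set connections → Spec_convert_ifg_connections_list_to_set connections (convert_ifg_connections_list_to_set connections)
def Claim_changed_convert_ifg_connections_list_to_set : Prop := Dom_convert_ifg_connections_list_to_set (pvDiffWitness_convert_ifg_connections_list_to_set) ∧ Pre_convert_ifg_connections_list_to_set (pvDiffWitness_convert_ifg_connections_list_to_set) ∧ D_convert_ifg_connections_list_to_set (pvDiffWitness_convert_ifg_connections_list_to_set) ∧ convert_ifg_connections_list_to_set (pvDiffWitness_convert_ifg_connections_list_to_set) = pvDiffWitnessOut_convert_ifg_connections_list_to_set.1 ∧ convert_ifg_connections_list_to_set_alt (pvDiffWitness_convert_ifg_connections_list_to_set) = pvDiffWitnessOut_convert_ifg_connections_list_to_set.2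 ∧ pvDiffWitnessOut_convert_ifg_connections_list_to_set.1 ≠ pvDiffWitnessOut_convert_ifg_connections_list_to_set.2

-- ===== LEMMAS AND PROOFS =====

theorem pvMaxNode_cons (p : Int × Int) (t : List (Int × Int)) :
    pvMaxNode (p :: t) = t.foldl (fun m q => max m (max q.1 q.2)) (max p.1 p.2) := rfl

theorem mem_nodes_fold (c : List (Int × Int)) :
    ∀ (s : PySem.Set Int) (x : Int),
      (x ∈ c.foldl (fun s p => PySem.Set.add (PySem.Set.add s p.1) p.2) s ↔
        x ∈ s ∨ ∃ p ∈ c, x = p.1 ∨ x = p.2) := by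
  induction c with
  | nil => simp
  | cons q t ih =>
      intro s x
      simp only [List.foldl_cons, ih, PySem.Set.mem_add, List.mem_cons]
      constructor
      · rintro (((h | h) | h) | ⟨p, hp, h⟩)
        · exact Or.inl h
        · exact Or.inr ⟨q, Or.inl rfl, Or.inl h⟩
        · exact Or.inr ⟨q, Or.inl rfl, Or.inr h⟩
        · exact Or.inr ⟨p, Or.inr hp, h⟩
      · rintro (h | ⟨p, (rfl | hp), h⟩)
        · exact Or.inl (Or.inl (Or.inl h))
        · rcases h with h | h
          · exact Or.inl (Or.inl (Or.inr h))
          · exact Or.inl (Or.inr h)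
        · exact Or.inr ⟨p, hp, h⟩

theorem foldmax_ge_init (t : List (Int × Int)) :
    ∀ m0 : Int, m0 ≤ t.foldl (fun m q => max m (max q.1 q.2)) m0 := by
  induction t with
  | nil => intro m0; simp
  | cons q t ih =>
      intro m0
      simpa using le_trans (le_max_left m0 (max q.1 q.2)) (ih (max m0 (max q.1 q.2)))

theorem foldmax_ge_mem (t : List (Int × Int)) :
    ∀ (m0 : Int) (q : Int × Int), q ∈ t →
      q.1 ≤ t.foldl (fun m q => max m (max q.1 q.2)) m0 ∧
      q.2 ≤ t.foldl (fun m q => max m (max q.1 q.2)) m0 := by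
  induction t with
  | nil => intro _ q h; simp at h
  | cons r t ih =>
      intro m0 q hq
      rcases List.mem_cons.mp hq with rfl | hq
      · have h := foldmax_ge_init t (max m0 (max q.1 q.2))
        simp only [List.foldl_cons]
        constructor
        · exact le_trans (le_trans (le_max_left _ _) (le_max_right m0 _)) h
        · exact le_trans (le_trans (le_max_right _ _) (le_max_right m0 _)) h
      · simpa using ih (max m0 (max r.1 r.2)) q hq

theorem foldmax_mem (t : List (Int × Int)) :
    ∀ m0 : Int, t.foldl (fun m q => max m (max q.1 q.2)) m0 = m0 ∨
      ∃ q ∈ t, t.foldl (fun m q => max m (max q.1 q.2)) m0 = q.1 ∨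
               t.foldl (fun m q => max m (max q.1 q.2)) m0 = q.2 := by
  induction t with
  | nil => intro m0; simp
  | cons r t ih =>
      intro m0
      simp only [List.foldl_cons]
      rcases ih (max m0 (max r.1 r.2)) with h | ⟨q, hq, h⟩
      · rw [h]
        rcases le_total m0 (max r.1 r.2) with hle | hle
        · rcases le_total r.1 r.2 with h2 | h2
          · refine Or.inr ⟨r, List.mem_cons_self .., Or.inr ?_⟩
            rw [max_eq_right hle, max_eq_right h2]
          · refine Or.inr ⟨r, List.mem_cons_self .., Or.inl ?_⟩
            rw [max_eq_right hle, max_eq_left h2]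
        · left; exact max_eq_left hle
      · exact Or.inr ⟨q, List.mem_cons_of_mem _ hq, h⟩

-- pvMaxNode is an endpoint of a nonempty list and bounds all endpoints
theorem pvMaxNode_isMax (p : Int × Int) (t : List (Int × Int)) :
    ∀ q ∈ p :: t, q.1 ≤ pvMaxNode (p :: t) ∧ q.2 ≤ pvMaxNode (p :: t) := by
  intro q hq
  rcases List.mem_cons.mp hq with rfl | hq
  · have h := foldmax_ge_init t (max q.1 q.2)
    rw [pvMaxNode_cons]
    exact ⟨le_trans (le_max_left _ _) h, le_trans (le_max_right _ _) h⟩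
  · rw [pvMaxNode_cons]
    exact foldmax_ge_mem t (max p.1 p.2) q hq

theorem pvMaxNode_mem (p : Int × Int) (t : List (Int × Int)) :
    ∃ q ∈ p :: t, pvMaxNode (p :: t) = q.1 ∨ pvMaxNode (p :: t) = q.2 := by
  rw [pvMaxNode_cons]
  rcases foldmax_mem t (max p.1 p.2) with h | ⟨q, hq, h⟩
  · refine ⟨p, List.mem_cons_self .., ?_⟩
    rcases le_total p.1 p.2 with h2 | h2
    · right; rw [h, max_eq_right h2]
    · left; rw [h, max_eq_left h2]
  · exact ⟨q, List.mem_cons_of_mem _ hq, h⟩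

-- A's max over the node set equals pvMaxNode
theorem maxA_eq (p : Int × Int) (t : List (Int × Int)) :
    PySem.List.max?
      ((p :: t).foldl (fun s q => PySem.Set.add (PySem.Set.add s q.1) q.2) PySem.Set.empty)
      (fun x => x) = some (pvMaxNode (p :: t)) := by
  set c := p :: t with hc
  set nodes := c.foldl (fun s q => PySem.Set.add (PySem.Set.add s q.1) q.2) PySem.Set.empty with hn
  have hmem : ∀ x, x ∈ nodes ↔ ∃ q ∈ c, x = q.1 ∨ x = q.2 := by
    intro x
    rw [hn, mem_nodes_fold]
    simp [PySem.Set.empty]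
  have hne : nodes ≠ [] := by
    intro h
    have : p.1 ∈ nodes := (hmem p.1).mpr ⟨p, List.mem_cons_self .., Or.inl rfl⟩
    simp [h] at this
  rcases h : PySem.List.max? nodes (fun x => x) with _ | m
  · exact absurd ((PySem.List.max?_eq_none_iff nodes (fun x => x)).mp h) hne
  · have hm : m ∈ nodes := PySem.List.max?_mem h
    have hle : ∀ y ∈ nodes, y ≤ m := fun y hy => PySem.List.max?_isMax h y hy
    congr 1
    have h1 : m ≤ pvMaxNode c := by
      rcases (hmem m).mp hm with ⟨q, hq, hm'⟩
      have h2 := pvMaxNode_isMax p t q hq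
      rcases hm' with rfl | rfl
      · exact h2.1
      · exact h2.2
    have h2 : pvMaxNode c ≤ m := by
      rcases pvMaxNode_mem p t with ⟨q, hq, hM⟩
      have := hle (pvMaxNode c) ((hmem _).mpr ⟨q, hq, hM⟩)
      omega
    omega

-- B's max over the generator of per-edge maxima equals pvMaxNode
theorem maxB_eq (p : Int × Int) (t : List (Int × Int)) :
    PySem.List.max? ((p :: t).map (fun q => max q.1 q.2)) (fun x => x)
      = some (pvMaxNode (p :: t)) := by
  rcases h : PySem.List.max? ((p :: t).map (fun q => max q.1 q.2)) (fun x => x) with _ | m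
  · have := (PySem.List.max?_eq_none_iff _ (fun x => x)).mp h
    simp at this
  · have hm := PySem.List.max?_mem h
    have hle := fun y hy => PySem.List.max?_isMax h y hy
    rw [h]
    congr 1
    rcases List.mem_map.mp hm with ⟨q, hq, rfl⟩
    have hb := pvMaxNode_isMax p t q hq
    have h1 : max q.1 q.2 ≤ pvMaxNode (p :: t) := max_le hb.1 hb.2
    have h2 : pvMaxNode (p :: t) ≤ max q.1 q.2 := by
      rcases pvMaxNode_mem p t with ⟨r, hr, hM⟩
      have hmemr : max r.1 r.2 ∈ (p :: t).map (fun q => max q.1 q.2) :=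
        List.mem_map.mpr ⟨r, hr, rfl⟩
      have := hle _ hmemr
      rcases hM with hM | hM
      · exact le_trans (hM ▸ le_max_left r.1 r.2) this
      · exact le_trans (hM ▸ le_max_right r.1 r.2) this
    exact le_antisymm h1 h2

-- main invariant: A's populate fold, read at a fixed index i, is the fold of Set.add over
-- exactly the edges whose source is i (B's per-index filter)
theorem populate_eq_filter (c : List (Int × Int)) :
    ∀ (L : List (List Int)),
      (∀ p ∈ c, 0 ≤ p.1 ∧ p.1 < (L.length : Int)) →
      ((c.foldl (fun cn p =>
          PySem.List.pySetD cn p.1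
            (PySem.Set.add (PySem.List.pyGetD cn p.1 PySem.Set.empty) p.2)) L).length = L.length ∧
       ∀ i : Nat, i < L.length →
        (c.foldl (fun cn p =>
          PySem.List.pySetD cn p.1
            (PySem.Set.add (PySem.List.pyGetD cn p.1 PySem.Set.empty) p.2)) L).getD i []
        = (c.filter (fun p => p.1 == (i : Int))).foldl
            (fun s p => PySem.Set.add s p.2) (L.getD i [])) := by
  induction c with
  | nil => intro L _; exact ⟨rfl, fun i _ => rfl⟩
  | cons p t ih =>
      intro L hb
      obtain ⟨hp0, hpn⟩ := hb p (List.mem_cons_self ..)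
      have hset : PySem.List.pySetD L p.1
          (PySem.Set.add (PySem.List.pyGetD L p.1 PySem.Set.empty) p.2)
          = L.set p.1.toNat (PySem.Set.add (L[p.1.toNat]'(by omega)) p.2) := by
        rw [PySem.List.pySetD_of_nonneg _ _ hp0,
            PySem.List.pyGetD_eq_getElem _ _ hp0 (by simpa using hpn)]
      simp only [List.foldl_cons]
      rw [hset]
      set L' := L.set p.1.toNat (PySem.Set.add (L[p.1.toNat]'(by omega)) p.2) with hL'
      have hlen : L'.length = L.length := by simp [hL']
      obtain ⟨hlen2, hal⟩ := ih L' (by rw [hlen]; exact fun q hq => hb q (List.mem_cons_of_mem _ hq))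
      refine ⟨by rw [hlen2, hlen], ?_⟩
      intro i hi
      rw [hal i (by omega)]
      have hgi : L'.getD i [] =
          if p.1 == (i : Int) then PySem.Set.add (L.getD i []) p.2 else L.getD i [] := by
        have hiL : i < L.length := hi
        rw [List.getD_eq_getElem _ _ (by omega : i < L'.length),
            List.getD_eq_getElem _ _ hiL]
        simp only [hL', List.getElem_set]
        by_cases hieq : p.1.toNat = i
        · have : p.1 == (i : Int) := by simp; omega
          simp [hieq, this]
        · have : ¬ (p.1 == (i : Int)) := by simp; omega
          simp [hieq, this]
      rw [hgi]
      by_cases hc : p.1 == (i : Int)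
      · rw [if_pos hc]; simp [hc]
      · rw [if_neg hc]; simp [hc]

-- ===== VERDICT (by name: the statement is the Claim_ definition above) =====
theorem convert_ifg_connections_list_to_set_spec : Claim_unchanged_convert_ifg_connections_list_to_set := by
  intro c _ _ hnd
  cases c with
  | nil => rfl
  | cons p t =>
      have hne : (p :: t) ≠ [] := by simp
      unfold convert_ifg_connections_list_to_set convert_ifg_connections_list_to_set_alt
      rw [if_neg hne, if_neg hne]
      simp only []
      rw [maxA_eq p t, maxB_eq p t]
      simp only []
      set m := pvMaxNode (p :: t) with hm
      set n := (m + 1).toNat with hn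
      have hm0 : 0 ≤ m := by
        have h1 := (pvMaxNode_isMax p t p (List.mem_cons_self ..)).1
        have h2 : 0 ≤ p.1 := by
          by_contra h
          exact hnd ⟨p, List.mem_cons_self .., by omega⟩
        omega
      have hb : ∀ q ∈ p :: t, 0 ≤ q.1 ∧ q.1 < ((List.replicate n ([] : List Int)).length : Int) := by
        intro q hq
        have h1 := (pvMaxNode_isMax p t q hq).1
        have h2 : 0 ≤ q.1 := by
          by_contra h
          exact hnd ⟨q, hq, by omega⟩
        refine ⟨h2, ?_⟩
        have : ((List.replicate n ([] : List Int)).length : Int) = m + 1 := by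
          simp [hn]; omega
        omega
      obtain ⟨hlen, hal⟩ := populate_eq_filter (p :: t) (List.replicate n []) hb
      apply List.ext_getElem
      · rw [hlen]
        simp [PySem.List.length_pyRange_one]
        omega
      · intro i h1 h2
        have hin : i < n := by
          rw [hlen] at h1; simpa using h1
        rw [← List.getD_eq_getElem _ ([] : List Int) h1,
            hal i (by simpa using hin), List.getElem_map,
            PySem.List.getElem_pyRange_one, zero_add]
        rw [List.getD_eq_getElem _ _ (by simpa using hin), List.getElem_replicate,
            PySem.Set.ofList_eq_foldl, List.foldl_map]

theorem convert_ifg_connections_list_to_set_changed : Claim_changed_convert_ifg_connections_list_to_set := by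
  unfold Claim_changed_convert_ifg_connections_list_to_set; decide
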